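-- pv_equiv track=rewrite | github.com/sergey-tinyaev/programming-challenges-cHJvamVjdGV1bGVy | p85/p85q.py | solve
-- ===== SOURCE A (Python) =====
-- def solve(n: int) -> int:
--     """Return area of the grid with number of rectangles closest to n."""
--     # Time: O(sqrt(n)).
--     # Space: O(1).
--
--     i = j = x = 1
--     min_diff, result = n - 1, 1
--
--     while x < n:
--         j += 1
--         x += j
--
--     diff = x - n
--     if diff < min_diff:
--         min_diff, result = diff, i * j
--
--     diff = n + j - x
--     if diff < min_diff:
--         min_diff, result = diff, i * (j - 1)
--
--     if min_diff == 0: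
--         return result
--
--     m = 1
--     while j > 1:
--         i += 1
--         m += i
--         x = m * x // (m - i)
--
--         while x > n:
--             x -= m * j
--             j -= 1
--
--         diff = n - x
--         if diff < min_diff:
--             min_diff, result = diff, i * j
--
--         diff = x + m * (j + 1) - n
--         if diff < min_diff:
--             min_diff, result = diff, i * (j + 1)
--
--         if min_diff == 0:
--             return result
--
--     return result
-- ===== SOURCE B (Python) =====
-- def solve(n: int) -> int:
--     """Return area of the grid with number of rectangles closest to n."""
--     # Alternative decomposition: per height i, compute T_i = i*(i+1)//2 directly
--     # and binary-search the largest width j with T_i*T_j <= n (no carried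
--     # incremental product, no monotone descending-j pointer).
--
--     if n <= 1:
--         return 1
--
--     def tri(k):
--         return k * (k + 1) // 2
--
--     def max_j(ti):
--         # largest j in [0, n] with ti * tri(j) <= n, by binary search
--         lo, hi = 0, n
--         while lo < hi:
--             mid = (lo + hi + 1) // 2
--             if ti * tri(mid) <= n:
--                 lo = mid
--             else:
--                 hi = mid - 1
--         return lo
--
--     best, result = n - 1, 1
--
--     j = max_j(1)
--     d = tri(j + 1) - n
--     if d < best:
--         best, result = d, j + 1
--     d = n - tri(j)
--     if d < best:
--         best, result = d, j
--     if best == 0: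
--         return result
--
--     i = 1
--     while j > 1:
--         i += 1
--         ti = tri(i)
--         j = max_j(ti)
--         d = n - ti * tri(j)
--         if d < best:
--             best, result = d, i * j
--         d = ti * tri(j + 1) - n
--         if d < best:
--             best, result = d, i * (j + 1)
--         if best == 0:
--             return result
--     return result
-- ===== Notes on version B (the rewrite author's own statement) =====
-- stated objective: alternative
-- what changed: Replaces A's carried incremental rectangle count (x updated by the exact-division trick x = m*x//(m-i)) and monotone descending-j pointer with per-height closed-form triangular numbers T_i = i*(i+1)//2 and a fresh binary search per height for the largest width j with T_i*T_j <= n.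
import Mathlib
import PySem

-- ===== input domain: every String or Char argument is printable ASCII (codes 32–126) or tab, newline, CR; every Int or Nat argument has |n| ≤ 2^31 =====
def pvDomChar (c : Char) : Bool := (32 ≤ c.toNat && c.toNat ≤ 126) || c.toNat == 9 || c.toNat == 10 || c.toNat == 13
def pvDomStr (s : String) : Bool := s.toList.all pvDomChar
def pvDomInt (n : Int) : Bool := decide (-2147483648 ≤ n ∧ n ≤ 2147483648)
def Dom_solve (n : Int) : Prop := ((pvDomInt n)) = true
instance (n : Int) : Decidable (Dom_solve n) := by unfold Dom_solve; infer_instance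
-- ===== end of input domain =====

-- B replaces A's carried incremental product and descending-j pointer by per-height
-- closed-form triangular numbers and a binary search for the width (objective: alternative).

-- ===== PORT A =====
-- while x < n: j += 1; x += j        (0 ≤ j is a totality guard only; j ≥ 1 on every reachable state)
def solveLoop1 (n j x : Int) : Int × Int :=
  if _h : x < n ∧ 0 ≤ j then solveLoop1 n (j + 1) (x + (j + 1)) else (j, x)
termination_by (n - x).toNat
decreasing_by omega

-- while x > n: x -= m*j; j -= 1      (0 < m*j is a totality guard only; it holds on every reachable state)
def solveInner (n m x j : Int) : Int × Int :=
  if _h : n < x ∧ 0 < m * j then solveInner n m (x - m * j) (j - 1) else (x, j)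
termination_by (x - n).toNat
decreasing_by omega

-- while j > 1: …                     (i < n is a totality guard only; it holds on every reachable state)
def solveOuter (n i j x m best result : Int) : Int :=
  if _h : 1 < j ∧ i < n then
    let i' := i + 1
    let m' := m + i'
    let x1 := PySem.Int.floordiv (m' * x) (m' - i')
    let p := solveInner n m' x1 j
    let d1 := n - p.1
    let best1 := if d1 < best then d1 else best
    let result1 := if d1 < best then i' * p.2 else result
    let d2 := p.1 + m' * (p.2 + 1) - n
    let best2 := if d2 < best1 then d2 else best1
    let result2 := if d2 < best1 then i' * (p.2 + 1) else result1
    if best2 = 0 then result2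
    else solveOuter n i' p.2 p.1 m' best2 result2
  else result
termination_by (n - i).toNat
decreasing_by omega

def solve (n : Int) : Int :=
  let p := solveLoop1 n 1 1
  let j := p.1
  let x := p.2
  let d1 := x - n
  let best1 := if d1 < n - 1 then d1 else n - 1
  let r1 := if d1 < n - 1 then 1 * j else 1
  let d2 := n + j - x
  let best2 := if d2 < best1 then d2 else best1
  let r2 := if d2 < best1 then 1 * (j - 1) else r1
  if best2 = 0 then r2 else solveOuter n 1 j x 1 best2 r2

-- ===== PORT B =====
-- tri(k) = k*(k+1)//2
def triAlt (k : Int) : Int := PySem.Int.floordiv (k * (k + 1)) 2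

-- midpoint bounds, used by the binary search's termination proof
theorem pvMidBounds (lo hi : Int) (h : lo < hi) :
    lo < PySem.Int.floordiv (lo + hi + 1) 2 ∧ PySem.Int.floordiv (lo + hi + 1) 2 ≤ hi := by
  have e : lo + hi + 1 = (lo + 1) + hi := by ring
  have := PySem.Int.floordiv_two_mid_bounds (lo := lo + 1) (hi := hi) (by omega)
  rw [e]
  omega

-- max_j's binary-search loop: largest j in [lo, hi] with ti*tri(j) <= n
def maxJAlt (n ti lo hi : Int) : Int :=
  if h : lo < hi then
    let mid := PySem.Int.floordiv (lo + hi + 1) 2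
    if ti * triAlt mid ≤ n then maxJAlt n ti mid hi
    else maxJAlt n ti lo (mid - 1)
  else lo
termination_by (hi - lo).toNat
decreasing_by
  · have := pvMidBounds lo hi h; omega
  · have := pvMidBounds lo hi h; omega

-- while j > 1: …                     (i < n is a totality guard only; it holds on every reachable state)
def solveAltLoop (n i j best result : Int) : Int :=
  if _h : 1 < j ∧ i < n then
    let i' := i + 1
    let ti := triAlt i'
    let j' := maxJAlt n ti 0 n
    let d1 := n - ti * triAlt j'
    let best1 := if d1 < best then d1 else best
    let result1 := if d1 < best then i' * j' else result
    let d2 := ti * triAlt (j' + 1) - n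
    let best2 := if d2 < best1 then d2 else best1
    let result2 := if d2 < best1 then i' * (j' + 1) else result1
    if best2 = 0 then result2
    else solveAltLoop n i' j' best2 result2
  else result
termination_by (n - i).toNat
decreasing_by omega

def solve_alt (n : Int) : Int :=
  if n ≤ 1 then 1
  else
    let j0 := maxJAlt n 1 0 n
    let d1 := triAlt (j0 + 1) - n
    let best1 := if d1 < n - 1 then d1 else n - 1
    let r1 := if d1 < n - 1 then j0 + 1 else 1
    let d2 := n - triAlt j0
    let best2 := if d2 < best1 then d2 else best1
    let r2 := if d2 < best1 then j0 else r1
    if best2 = 0 then r2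
    else solveAltLoop n 1 j0 best2 r2

-- ===== PRECONDITION & SPEC =====
def Spec_solve (n : Int) (out : Int) : Prop := out = solve_alt n
instance (n : Int) (out : Int) : Decidable (Spec_solve n out) := by unfold Spec_solve; infer_instance

-- ===== CLAIM (what is proved, stated in full; the proofs are below) =====
def Claim_equal_solve : Prop := ∀ (n : Int), Dom_solve n → Spec_solve n (solve n)

-- ===== LEMMAS AND PROOFS =====

theorem two_triAlt (k : Int) : 2 * triAlt k = k * (k + 1) := by
  have hdvd : (2 : Int) ∣ k * (k + 1) := (Int.even_mul_succ_self k).two_dvd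
  rw [triAlt, PySem.Int.floordiv_eq_ediv_of_pos (by norm_num)]
  exact Int.mul_ediv_cancel' hdvd

theorem triAlt_succ (k : Int) : triAlt (k + 1) = triAlt k + (k + 1) := by
  have h1 := two_triAlt k
  have h2 := two_triAlt (k + 1)
  have e : (k + 1) * (k + 1 + 1) = k * (k + 1) + 2 * (k + 1) := by ring
  linarith

theorem triAlt_nonneg {k : Int} (h : 0 ≤ k) : 0 ≤ triAlt k := by
  have := two_triAlt k; nlinarith

theorem triAlt_le_triAlt {a b : Int} (ha : 0 ≤ a) (hab : a ≤ b) : triAlt a ≤ triAlt b := by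
  have h1 := two_triAlt a
  have h2 := two_triAlt b
  nlinarith

theorem triAlt_lt_triAlt {a b : Int} (ha : 0 ≤ a) (hab : a < b) : triAlt a < triAlt b := by
  have h1 := two_triAlt a
  have h2 := two_triAlt b
  nlinarith

theorem le_triAlt_self {k : Int} (h : 0 ≤ k) : k ≤ triAlt k := by
  have h2 := two_triAlt k
  nlinarith [mul_nonneg h (show (0:Int) ≤ k + 1 - 2 + 1 from by omega), mul_nonneg h h]

-- j is the largest width whose rectangle count m*tri(j) is at most n
def IsMaxJ (m n j : Int) : Prop := 0 ≤ j ∧ m * triAlt j ≤ n ∧ n < m * triAlt (j + 1)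

theorem le_of_isMaxJ {m n j : Int} (hm : 0 < m) (h : IsMaxJ m n j) :
    ∀ t, 0 ≤ t → m * triAlt t ≤ n → t ≤ j := by
  obtain ⟨hj0, hja, hjb⟩ := h
  rintro t ht hle
  by_contra hgt
  push Not at hgt
  have h1 : triAlt (j + 1) ≤ triAlt t := triAlt_le_triAlt (by omega) (by omega)
  have h2 : m * triAlt (j + 1) ≤ m * triAlt t := by
    exact mul_le_mul_of_nonneg_left h1 (le_of_lt hm)
  linarith

theorem exists_isMaxJ {m n : Int} (hm : 0 < m) (hn : 0 ≤ n) : ∃ j, IsMaxJ m n j := by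
  have hex : ∃ k : ℕ, n < m * triAlt (k : Int) := by
    refine ⟨n.toNat + 1, ?_⟩
    have hc : ((n.toNat + 1 : ℕ) : Int) = n + 1 := by push_cast; omega
    rw [hc]
    have h1 : n + 1 ≤ triAlt (n + 1) := le_triAlt_self (by omega)
    have h2 : triAlt (n + 1) ≤ m * triAlt (n + 1) := by nlinarith
    omega
  classical
  have hK : n < m * triAlt ((Nat.find hex : ℕ) : Int) := Nat.find_spec hex
  have hK0 : Nat.find hex ≠ 0 := by
    intro h0
    rw [h0] at hK
    have hz : triAlt ((0 : ℕ) : Int) = 0 := by decide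
    rw [hz] at hK
    omega
  have h1K : 1 ≤ Nat.find hex := Nat.one_le_iff_ne_zero.mpr hK0
  have hKm : ¬ n < m * triAlt ((Nat.find hex - 1 : ℕ) : Int) := Nat.find_min hex (by omega)
  refine ⟨((Nat.find hex : ℕ) : Int) - 1, by omega, ?_, ?_⟩
  · have hc : ((Nat.find hex - 1 : ℕ) : Int) = ((Nat.find hex : ℕ) : Int) - 1 := by omega
    rw [hc] at hKm
    omega
  · have hc : ((Nat.find hex : ℕ) : Int) - 1 + 1 = ((Nat.find hex : ℕ) : Int) := by ring
    rw [hc]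
    exact hK

-- binary search returns the (unique) IsMaxJ witness lying inside its bracket
theorem maxJAlt_eq {n ti j : Int} (hm : 0 < ti) (hj : IsMaxJ ti n j) :
    ∀ (k : ℕ) (lo hi : Int), (hi - lo).toNat = k → 0 ≤ lo → lo ≤ j → j ≤ hi →
      maxJAlt n ti lo hi = j := by
  intro k
  induction k using Nat.strong_induction_on with
  | _ k ih =>
    intro lo hi hk h0 hlj hjh
    rw [maxJAlt]
    by_cases hlh : lo < hi
    · rw [dif_pos hlh]
      have hmid := pvMidBounds lo hi hlh
      by_cases hc : ti * triAlt (PySem.Int.floordiv (lo + hi + 1) 2) ≤ n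
      · rw [if_pos hc]
        exact ih (hi - PySem.Int.floordiv (lo + hi + 1) 2).toNat (by omega) _ _ rfl
          (by omega) (le_of_isMaxJ hm hj _ (by omega) hc) hjh
      · rw [if_neg hc]
        have hjm : j < PySem.Int.floordiv (lo + hi + 1) 2 := by
          by_contra hle2
          push Not at hle2
          have h1 : triAlt (PySem.Int.floordiv (lo + hi + 1) 2) ≤ triAlt j :=
            triAlt_le_triAlt (by omega) hle2
          have h2 : ti * triAlt (PySem.Int.floordiv (lo + hi + 1) 2) ≤ ti * triAlt j :=
            mul_le_mul_of_nonneg_left h1 (le_of_lt hm)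
          obtain ⟨hj0, hja, hjb⟩ := hj
          exact hc (by linarith)
        exact ih (PySem.Int.floordiv (lo + hi + 1) 2 - 1 - lo).toNat (by omega) _ _ rfl
          h0 hlj (by omega)
    · rw [dif_neg hlh]
      omega

-- the descending inner while-loop lands on the IsMaxJ witness
theorem solveInner_eq {n m j0 : Int} (hm : 0 < m) (hj0 : IsMaxJ m n j0) :
    ∀ (k : ℕ) (j : Int), (j - j0).toNat = k → j0 ≤ j →
      solveInner n m (m * triAlt j) j = (m * triAlt j0, j0) := by
  intro k
  induction k using Nat.strong_induction_on with
  | _ k ih =>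
    intro j hk hj
    obtain ⟨hj00, hja, hjb⟩ := hj0
    rw [solveInner]
    by_cases heq : j = j0
    · subst heq
      rw [dif_neg (by rintro ⟨h1, _⟩; linarith)]
    · have hlt : j0 < j := lt_of_le_of_ne hj (Ne.symm heq)
      have h1 : triAlt (j0 + 1) ≤ triAlt j := triAlt_le_triAlt (by omega) (by omega)
      have h2 : m * triAlt (j0 + 1) ≤ m * triAlt j := mul_le_mul_of_nonneg_left h1 (le_of_lt hm)
      have hx : n < m * triAlt j := by linarith
      have hmj : 0 < m * j := mul_pos hm (by omega)
      rw [dif_pos ⟨hx, hmj⟩]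
      have hts : triAlt j = triAlt (j - 1) + j := by
        have h3 := triAlt_succ (j - 1)
        have e : j - 1 + 1 = j := by ring
        rw [e] at h3
        linarith
      have hstep : m * triAlt j - m * j = m * triAlt (j - 1) := by rw [hts]; ring
      rw [hstep]
      exact ih (j - 1 - j0).toNat (by omega) (j - 1) rfl (by omega)

-- the first climbing loop ends at the first triangular number ≥ n
theorem solveLoop1_eq (n : Int) :
    ∀ (k : ℕ) (j : Int), (n - triAlt j).toNat = k → 1 ≤ j → triAlt (j - 1) < n →
      ∃ J, solveLoop1 n j (triAlt j) = (J, triAlt J) ∧ j ≤ J ∧ triAlt (J - 1) < n ∧ n ≤ triAlt J := by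
  intro k
  induction k using Nat.strong_induction_on with
  | _ k ih =>
    intro j hk h1j hprev
    rw [solveLoop1]
    by_cases hc : triAlt j < n
    · rw [dif_pos ⟨hc, by omega⟩]
      have hx : triAlt j + (j + 1) = triAlt (j + 1) := (triAlt_succ j).symm
      rw [hx]
      have hmono : triAlt j < triAlt (j + 1) := triAlt_lt_triAlt (by omega) (by omega)
      have hp : triAlt (j + 1 - 1) < n := by
        have e : j + 1 - 1 = j := by ring
        rw [e]
        exact hc
      obtain ⟨J, hJa, hJb, hJc, hJd⟩ := ih (n - triAlt (j + 1)).toNat (by omega) (j + 1) rfl (by omega) hp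
      exact ⟨J, hJa, by omega, hJc, hJd⟩
    · rw [dif_neg (by rintro ⟨h1, _⟩; omega)]
      exact ⟨j, rfl, le_refl j, hprev, by omega⟩

-- lockstep: A's outer loop and B's outer loop compute the same answer
theorem lockstep (n : Int) (hn : 2 ≤ n) :
    ∀ (k : ℕ) (i jA jB x m best result : Int), (n - i).toNat = k →
      1 ≤ i → m = triAlt i → x = m * triAlt jA → 0 ≤ jA →
      (1 < jA ↔ 1 < jB) →
      (∀ t, 0 ≤ t → m * triAlt t ≤ n → t ≤ jA) →
      solveOuter n i jA x m best result = solveAltLoop n i jB best result := by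
  intro k
  induction k using Nat.strong_induction_on with
  | _ k ih =>
    intro i jA jB x m best result hk h1i hm hx hjA hiff H
    rw [solveOuter, solveAltLoop]
    by_cases hcond : 1 < jA ∧ i < n
    · have hcondB : 1 < jB ∧ i < n := ⟨hiff.mp hcond.1, hcond.2⟩
      rw [dif_pos hcond, dif_pos hcondB]
      dsimp only
      have hipos : (0:Int) ≤ i := by omega
      have hmpos : 0 < m := by
        have h1 := le_triAlt_self hipos
        omega
      have hm' : m + (i + 1) = triAlt (i + 1) := by
        have h1 := triAlt_succ i
        linarith
      rw [hm']
      have hm'pos : 0 < triAlt (i + 1) := by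
        have h1 := le_triAlt_self (show (0:Int) ≤ i + 1 by omega)
        omega
      have hmle : m ≤ triAlt (i + 1) := by
        have h1 := triAlt_succ i
        linarith
      -- the carried division is exact: m'*x // (m'-i') = m' * tri jA
      have hx1 : PySem.Int.floordiv (triAlt (i + 1) * x) (triAlt (i + 1) - (i + 1))
          = triAlt (i + 1) * triAlt jA := by
        have e1 : triAlt (i + 1) - (i + 1) = m := by
          have h1 := triAlt_succ i
          linarith
        have e2 : triAlt (i + 1) * x = m * (triAlt (i + 1) * triAlt jA) := by rw [hx]; ring
        rw [e1, e2, PySem.Int.floordiv_eq_ediv_of_pos hmpos,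
          Int.mul_ediv_cancel_left _ (ne_of_gt hmpos)]
      rw [hx1]
      obtain ⟨j2, hj2⟩ := exists_isMaxJ hm'pos (show (0:Int) ≤ n by omega)
      have hj2A : j2 ≤ jA := by
        refine H j2 hj2.1 ?_
        have h1 : m * triAlt j2 ≤ triAlt (i + 1) * triAlt j2 :=
          mul_le_mul_of_nonneg_right hmle (triAlt_nonneg hj2.1)
        have h2 := hj2.2.1
        linarith
      have hinner : solveInner n (triAlt (i + 1)) (triAlt (i + 1) * triAlt jA) jA
          = (triAlt (i + 1) * triAlt j2, j2) :=
        solveInner_eq hm'pos hj2 (jA - j2).toNat jA rfl hj2A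
      rw [hinner]
      dsimp only
      have hj2n : j2 ≤ n := by
        have h1 := le_triAlt_self hj2.1
        have h2 : triAlt j2 ≤ triAlt (i + 1) * triAlt j2 :=
          le_mul_of_one_le_left (triAlt_nonneg hj2.1) (by omega)
        have h3 := hj2.2.1
        linarith
      have hbs : maxJAlt n (triAlt (i + 1)) 0 n = j2 :=
        maxJAlt_eq hm'pos hj2 (n - 0).toNat 0 n rfl le_rfl hj2.1 hj2n
      rw [hbs]
      have hd2 : triAlt (i + 1) * triAlt (j2 + 1)
          = triAlt (i + 1) * triAlt j2 + triAlt (i + 1) * (j2 + 1) := by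
        rw [triAlt_succ j2]; ring
      rw [hd2]
      -- both sides now share all candidate terms except the final recursive call
      have hloop : ∀ b r, solveOuter n (i + 1) j2 (triAlt (i + 1) * triAlt j2) (triAlt (i + 1)) b r
          = solveAltLoop n (i + 1) j2 b r := by
        intro b r
        exact ih (n - (i + 1)).toNat (by omega) (i + 1) j2 j2 _ _ b r rfl (by omega) rfl rfl
          hj2.1 Iff.rfl (le_of_isMaxJ hm'pos hj2)
      by_cases hd1c : n - triAlt (i + 1) * triAlt j2 < best
      · simp only [if_pos hd1c]
        by_cases hd2c : triAlt (i + 1) * triAlt j2 + triAlt (i + 1) * (j2 + 1) - n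
            < n - triAlt (i + 1) * triAlt j2
        · simp only [if_pos hd2c]
          split_ifs with hb0
          · rfl
          · exact hloop _ _
        · simp only [if_neg hd2c]
          split_ifs with hb0
          · rfl
          · exact hloop _ _
      · simp only [if_neg hd1c]
        by_cases hd2c : triAlt (i + 1) * triAlt j2 + triAlt (i + 1) * (j2 + 1) - n < best
        · simp only [if_pos hd2c]
          split_ifs with hb0
          · rfl
          · exact hloop _ _
        · simp only [if_neg hd2c]
          split_ifs with hb0
          · rfl
          · exact hloop _ _
    · have hcondB : ¬(1 < jB ∧ i < n) := by
        rintro ⟨a, b⟩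
        exact hcond ⟨hiff.mpr a, b⟩
      rw [dif_neg hcond, dif_neg hcondB]

theorem solve_le_one (n : Int) (hn : n ≤ 1) : solve n = 1 := by
  rw [solve]
  rw [solveLoop1, dif_neg (by omega : ¬((1:Int) < n ∧ (0:Int) ≤ 1))]
  dsimp only
  simp only [if_neg (show ¬((1:Int) - n < n - 1) by omega)]
  simp only [if_neg (show ¬(n + 1 - 1 < n - 1) by omega)]
  by_cases hone : n = 1
  · subst hone
    norm_num
  · rw [if_neg (by omega : ¬(n - 1 = 0))]
    rw [solveOuter, dif_neg (by omega : ¬((1:Int) < 1 ∧ 1 < n))]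

theorem solve_two : solve 2 = 1 := by
  rw [solve]
  rw [solveLoop1]; norm_num
  rw [solveLoop1]; norm_num
  rw [solveOuter]; norm_num [PySem.Int.floordiv_eq_ediv_of_pos]
  have hi1 : solveInner 2 3 9 2 = (0, 0) := by
    rw [solveInner]; norm_num
    rw [solveInner]; norm_num
    rw [solveInner]; norm_num
  rw [hi1]; norm_num
  rw [solveOuter]; norm_num

theorem solve_alt_two : solve_alt 2 = 1 := by
  rw [solve_alt]; norm_num
  have hm : maxJAlt 2 1 0 2 = 1 := by
    rw [maxJAlt]; norm_num [PySem.Int.floordiv_eq_ediv_of_pos, triAlt]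
    rw [maxJAlt]; norm_num [PySem.Int.floordiv_eq_ediv_of_pos, triAlt]
    rw [maxJAlt]; norm_num
  rw [hm]; norm_num [triAlt, PySem.Int.floordiv_eq_ediv_of_pos]
  rw [solveAltLoop]; norm_num

theorem solve_eq_solve_alt (n : Int) : solve n = solve_alt n := by
  by_cases hn1 : n ≤ 1
  · rw [solve_alt, if_pos hn1, solve_le_one n hn1]
  push Not at hn1
  by_cases hn2 : n = 2
  · rw [hn2, solve_two, solve_alt_two]
  have hn3 : 3 ≤ n := by omega
  have h10 : triAlt (1 : Int) = 1 := by decide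
  obtain ⟨J, hJeq, hJ1, hJprev, hJge⟩ :=
    solveLoop1_eq n (n - triAlt 1).toNat 1 rfl le_rfl
      (by have h00 : triAlt (1 - 1 : Int) = 0 := by decide
          omega)
  rw [h10] at hJeq
  have hJ2 : 2 ≤ J := by
    by_contra hcon
    push Not at hcon
    have he1 : J = 1 := by omega
    rw [he1, h10] at hJge
    omega
  rw [solve]
  rw [hJeq]
  dsimp only
  rw [solve_alt, if_neg (by omega : ¬(n ≤ 1))]
  dsimp only
  by_cases hex : triAlt J = n
  · -- exact hit: both sides return the area J
    have hpos : 0 < triAlt (J + 1) - n := by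
      have h1 := triAlt_lt_triAlt (show (0:Int) ≤ J by omega) (show J < J + 1 by omega)
      omega
    have hmax : IsMaxJ 1 n J := by
      refine ⟨by omega, by rw [one_mul]; omega, ?_⟩
      rw [one_mul]
      omega
    have hj0 : maxJAlt n 1 0 n = J :=
      maxJAlt_eq (by norm_num) hmax (n - 0).toNat 0 n rfl le_rfl (by omega)
        (by have h1 := le_triAlt_self (show (0:Int) ≤ J by omega); omega)
    rw [hj0]
    simp only [if_pos (show triAlt J - n < n - 1 by omega)]
    simp only [if_neg (show ¬(n + J - triAlt J < triAlt J - n) by omega)]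
    rw [if_pos (show triAlt J - n = 0 by omega)]
    by_cases hc1 : triAlt (J + 1) - n < n - 1
    · simp only [if_pos hc1]
      simp only [if_pos (show n - triAlt J < triAlt (J + 1) - n by omega)]
      rw [if_pos (show n - triAlt J = 0 by omega)]
      ring
    · simp only [if_neg hc1]
      simp only [if_pos (show n - triAlt J < n - 1 by omega)]
      rw [if_pos (show n - triAlt J = 0 by omega)]
      ring
  · have hgt : n < triAlt J := by omega
    have hJ3 : 3 ≤ J := by
      by_contra hcon
      push Not at hcon
      have he2 : J = 2 := by omega
      rw [he2] at hgt
      have h23 : triAlt (2 : Int) = 3 := by decide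
      omega
    have hmax : IsMaxJ 1 n (J - 1) := by
      refine ⟨by omega, by rw [one_mul]; omega, ?_⟩
      rw [one_mul, show J - 1 + 1 = J from by omega]
      omega
    have hj0 : maxJAlt n 1 0 n = J - 1 :=
      maxJAlt_eq (by norm_num) hmax (n - 0).toNat 0 n rfl le_rfl (by omega)
        (by have h1 := le_triAlt_self (show (0:Int) ≤ J - 1 by omega); omega)
    rw [hj0]
    simp only [show J - 1 + 1 = J from by omega]
    have hd2 : n - triAlt (J - 1) = n + J - triAlt J := by
      have h3 := triAlt_succ (J - 1)
      rw [show J - 1 + 1 = J from by omega] at h3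
      linarith
    rw [hd2]
    simp only [one_mul]
    have hloop : ∀ b r, solveOuter n 1 J (triAlt J) 1 b r = solveAltLoop n 1 (J - 1) b r := by
      intro b r
      refine lockstep n (by omega) (n - 1).toNat 1 J (J - 1) (triAlt J) 1 b r rfl le_rfl
        (by decide) (one_mul _).symm (by omega) (iff_of_true (by omega) (by omega)) ?_
      intro t ht hle
      rw [one_mul] at hle
      by_contra hgt2
      push Not at hgt2
      have h4 : triAlt J ≤ triAlt t := triAlt_le_triAlt (by omega) (by omega)
      linarith
    rw [hloop]

-- ===== VERDICT (by name: the statement is the Claim_ definition above) =====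
theorem solve_spec : Claim_equal_solve := by
  intro n _ 
  unfold Spec_solve
  exact solve_eq_solve_alt n
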